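-- pv_equiv track=rewrite | github.com/juandastic/synapse-cortex | app/services/hydration_v2.py | _extract_user_lines
-- ===== SOURCE A (Python) =====
-- _USER_PREFIX = "User: "
--
-- def _extract_user_lines(content: str, limit: int) -> str:
--     """Extract user messages from raw episode content as a fallback summary.
--
--     Episode content is formatted as "User: ...\n\nAssistant: ..." blocks.
--     We only keep the user parts (the valuable signal) and join them with " | ".
--     """
--     parts: list[str] = []
--     total = 0
--     for block in content.split("\n\n"):
--         block = block.strip()
--         if block.startswith(_USER_PREFIX):
--             text = block[len(_USER_PREFIX):].strip()
--             if not text: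
--                 continue
--             if total + len(text) > limit:
--                 remaining = limit - total
--                 if remaining > 20:
--                     parts.append(text[:remaining] + "...")
--                 break
--             parts.append(text)
--             total += len(text)
--     return " | ".join(parts) if parts else content[:limit] + "..."
-- ===== SOURCE B (Python) =====
-- _USER_PREFIX = "User: "
--
-- def _extract_user_lines(content: str, limit: int) -> str:
--     # Phase 1: collect the non-empty user texts.
--     texts = []
--     for b in content.split("\n\n"):
--         blk = b.strip()
--         if blk.startswith(_USER_PREFIX):
--             t = blk[len(_USER_PREFIX):].strip()
--             if t:
--                 texts.append(t)
--     # Phase 2: cumulative lengths, then count how many fit entirely.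
--     prefix = []
--     run = 0
--     for t in texts:
--         run += len(t)
--         prefix.append(run)
--     k = 0
--     for p in prefix:
--         if p > limit:
--             break
--         k += 1
--     pieces = texts[:k]
--     if k < len(texts):
--         remaining = limit - (prefix[k - 1] if k else 0)
--         if remaining > 20:
--             pieces.append(texts[k][:remaining] + "...")
--     return " | ".join(pieces) if pieces else content[:limit] + "..."
-- ===== Notes on version B (the rewrite author's own statement) =====
-- stated objective: alternative
-- what changed: A's single fused loop (filter blocks, accumulate parts and running total, break on overflow) is split into separate passes: collect the user texts, build their cumulative lengths, count how many fit within the limit, then assemble the kept texts plus an optional truncated boundary text.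
import Mathlib
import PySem

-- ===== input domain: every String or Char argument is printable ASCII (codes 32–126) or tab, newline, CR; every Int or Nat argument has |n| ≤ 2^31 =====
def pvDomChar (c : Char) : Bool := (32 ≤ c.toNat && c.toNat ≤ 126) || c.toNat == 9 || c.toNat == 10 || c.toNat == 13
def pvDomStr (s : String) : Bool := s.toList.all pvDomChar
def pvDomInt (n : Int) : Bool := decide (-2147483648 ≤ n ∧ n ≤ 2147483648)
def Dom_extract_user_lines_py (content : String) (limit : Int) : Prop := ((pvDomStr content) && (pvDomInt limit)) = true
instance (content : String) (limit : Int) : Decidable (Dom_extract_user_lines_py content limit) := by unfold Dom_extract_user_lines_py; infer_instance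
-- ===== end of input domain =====

-- B re-decomposes A's fused filter+accumulate+break loop into two passes (collect user texts, then cumulative
-- lengths + leading-count cut); objective: alternative decomposition, same asymptotic cost, return value identical.

-- ===== PORT A =====
-- A's single loop over blocks: filters user blocks, accumulates parts and total, breaks on overflow.
def pvALoop (blocks : List String) (parts : List String) (total : Int) (limit : Int) : List String :=
  match blocks with
  | [] => parts
  | b :: rest =>
    let block := PySem.Str.strip b
    if PySem.Str.startswith block "User: " then
      let text := PySem.Str.strip (PySem.Str.slice block (some 6) none)
      if text = "" then pvALoop rest parts total limit
      else if total + PySem.Str.len text > limit then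
        if limit - total > 20 then
          parts ++ [PySem.Str.slice text none (some (limit - total)) ++ "..."]
        else parts
      else pvALoop rest (parts ++ [text]) (total + PySem.Str.len text) limit
    else pvALoop rest parts total limit

def extract_user_lines_py (content : String) (limit : Int) : String :=
  let parts := pvALoop ((PySem.Str.split? content "\n\n").getD []) [] 0 limit
  if parts ≠ [] then PySem.Str.join " | " parts
  else PySem.Str.slice content none (some limit) ++ "..."

-- ===== PORT B =====
-- Phase 1: collect the non-empty user texts.
def pvBTexts (blocks : List String) (texts : List String) : List String :=
  match blocks with
  | [] => texts
  | b :: rest =>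
    let blk := PySem.Str.strip b
    if PySem.Str.startswith blk "User: " then
      let t := PySem.Str.strip (PySem.Str.slice blk (some 6) none)
      if t = "" then pvBTexts rest texts
      else pvBTexts rest (texts ++ [t])
    else pvBTexts rest texts

-- Phase 2a: cumulative lengths.
def pvBPrefix (texts : List String) (pre : List Int) (run : Int) : List Int :=
  match texts with
  | [] => pre
  | t :: rest => pvBPrefix rest (pre ++ [run + PySem.Str.len t]) (run + PySem.Str.len t)

-- Phase 2b: count how many cumulative lengths fit (for-loop with break).
def pvBCount (pre : List Int) (limit : Int) (k : Nat) : Nat :=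
  match pre with
  | [] => k
  | p :: rest => if p > limit then k else pvBCount rest limit (k + 1)

-- Phase 2c: take the k fitting texts, plus a truncated boundary text when worthwhile.
def pvBAssemble (texts : List String) (limit : Int) : List String :=
  let pre := pvBPrefix texts [] 0
  let k := pvBCount pre limit 0
  let pieces := List.take k texts
  if k < texts.length then
    let base := if k = 0 then 0 else PySem.List.pyGetD pre ((k : Int) - 1) 0
    let remaining := limit - base
    if remaining > 20 then
      pieces ++ [PySem.Str.slice (PySem.List.pyGetD texts (k : Int) "") none (some remaining) ++ "..."]
    else pieces
  else pieces

def extract_user_lines_py_alt (content : String) (limit : Int) : String :=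
  let pieces := pvBAssemble (pvBTexts ((PySem.Str.split? content "\n\n").getD []) []) limit
  if pieces ≠ [] then PySem.Str.join " | " pieces
  else PySem.Str.slice content none (some limit) ++ "..."

-- ===== PRECONDITION & SPEC =====
def Spec_extract_user_lines_py (content : String) (limit : Int) (out : String) : Prop := out = extract_user_lines_py_alt content limit
instance (content : String) (limit : Int) (out : String) : Decidable (Spec_extract_user_lines_py content limit out) := by unfold Spec_extract_user_lines_py; infer_instance

-- ===== CLAIM (what is proved, stated in full; the proofs are below) =====
def Claim_equal_extract_user_lines_py : Prop := ∀ (content : String) (limit : Int), Dom_extract_user_lines_py content limit → Spec_extract_user_lines_py content limit (extract_user_lines_py content limit)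

-- ===== LEMMAS AND PROOFS =====

-- Common normal form: the pieces selected from a text list given a remaining budget.
def pvPieces : List String → Int → List String
  | [], _ => []
  | t :: rest, budget =>
    if PySem.Str.len t > budget then
      (if budget > 20 then [PySem.Str.slice t none (some budget) ++ "..."] else [])
    else t :: pvPieces rest (budget - PySem.Str.len t)

-- Mathematical cumulative sums (normal form of pvBPrefix).
def pvCums : List String → Int → List Int
  | [], _ => []
  | t :: rest, run => (run + PySem.Str.len t) :: pvCums rest (run + PySem.Str.len t)

-- Leading-count normal form of pvBCount.
def pvCL : List Int → Int → Nat
  | [], _ => 0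
  | p :: rest, limit => if p > limit then 0 else pvCL rest limit + 1

theorem pvBTexts_acc (blocks : List String) (acc : List String) :
    pvBTexts blocks acc = acc ++ pvBTexts blocks [] := by
  induction blocks generalizing acc with
  | nil => simp [pvBTexts]
  | cons b rest ih =>
    simp only [pvBTexts]
    split_ifs with h1 h2
    · exact ih acc
    · rw [ih (acc ++ _), ih ([] ++ _)]; simp
    · exact ih acc

theorem pvBPrefix_eq (texts : List String) (acc : List Int) (run : Int) :
    pvBPrefix texts acc run = acc ++ pvCums texts run := by
  induction texts generalizing acc run with
  | nil => simp [pvBPrefix, pvCums]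
  | cons t rest ih => simp [pvBPrefix, pvCums, ih]

theorem pvBCount_eq (pre : List Int) (limit : Int) (k : Nat) :
    pvBCount pre limit k = k + pvCL pre limit := by
  induction pre generalizing k with
  | nil => simp [pvBCount, pvCL]
  | cons p rest ih =>
    simp only [pvBCount, pvCL]
    split_ifs with h
    · simp
    · rw [ih]; omega

theorem pvCums_shift (texts : List String) (a b : Int) :
    pvCums texts (a + b) = (pvCums texts b).map (a + ·) := by
  induction texts generalizing b with
  | nil => simp [pvCums]
  | cons t rest ih =>
    simp only [pvCums, List.map]
    rw [show a + b + PySem.Str.len t = a + (b + PySem.Str.len t) by ring, ih]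

theorem pvCL_map_shift (l : List Int) (a limit : Int) :
    pvCL (l.map (a + ·)) limit = pvCL l (limit - a) := by
  induction l with
  | nil => simp [pvCL]
  | cons p rest ih =>
    simp only [List.map, pvCL, ih]
    have h : a + p > limit ↔ p > limit - a := by omega
    simp [h]

theorem pvCL_le_length (l : List Int) (limit : Int) : pvCL l limit ≤ l.length := by
  induction l with
  | nil => simp [pvCL]
  | cons p rest ih =>
    simp only [pvCL, List.length_cons]
    split_ifs
    · omega
    · omega

theorem pvCums_length (texts : List String) (run : Int) :
    (pvCums texts run).length = texts.length := by
  induction texts generalizing run with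
  | nil => simp [pvCums]
  | cons t rest ih => simp [pvCums, ih]

theorem pvBAssemble_eq (texts : List String) (limit : Int) :
    pvBAssemble texts limit = pvPieces texts limit := by
  induction texts generalizing limit with
  | nil => simp [pvBAssemble, pvPieces, pvBPrefix, pvBCount]
  | cons t rest ih =>
    have hpre : pvBPrefix (t :: rest) [] 0 =
        PySem.Str.len t :: (pvCums rest 0).map (PySem.Str.len t + ·) := by
      rw [pvBPrefix_eq]
      simp only [List.nil_append, pvCums, zero_add]
      congr 1
      have h := pvCums_shift rest (PySem.Str.len t) 0
      rw [add_zero] at h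
      exact h
    by_cases hgt : PySem.Str.len t > limit
    · -- nothing fits entirely: k = 0, only a possible truncated first text
      have hk : pvBCount (pvBPrefix (t :: rest) [] 0) limit 0 = 0 := by
        rw [hpre, pvBCount_eq]
        simp only [pvCL]
        rw [if_pos hgt]
      simp only [pvBAssemble, hk, pvPieces]
      rw [if_pos hgt]
      simp
    · -- t fits: k = k' + 1, peel t and recurse via ih
      have hkc : pvCL (PySem.Str.len t :: (pvCums rest 0).map (PySem.Str.len t + ·)) limit
          = pvCL (pvCums rest 0) (limit - PySem.Str.len t) + 1 := by
        simp only [pvCL]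
        rw [if_neg hgt, pvCL_map_shift]
      have hrhs : pvPieces (t :: rest) limit =
          t :: pvBAssemble rest (limit - PySem.Str.len t) := by
        simp only [pvPieces]
        rw [if_neg hgt, ih]
      rw [hrhs]
      have hk'le : pvCL (pvCums rest 0) (limit - PySem.Str.len t) ≤ rest.length := by
        have h := pvCL_le_length (pvCums rest 0) (limit - PySem.Str.len t)
        rwa [pvCums_length] at h
      simp only [pvBAssemble, hpre, pvBPrefix_eq, List.nil_append, pvBCount_eq, zero_add, hkc]
      revert hk'le
      generalize pvCL (pvCums rest 0) (limit - PySem.Str.len t) = k'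
      intro hk'le
      simp only [List.take_succ_cons, List.length_cons]
      by_cases hcut : k' < rest.length
      · rw [if_pos (by omega), if_pos hcut]
        have hbase : (if k' + 1 = 0 then (0:Int)
              else PySem.List.pyGetD (PySem.Str.len t :: (pvCums rest 0).map (PySem.Str.len t + ·)) (((k' + 1 : Nat) : Int) - 1) 0)
            = PySem.Str.len t + (if k' = 0 then 0 else PySem.List.pyGetD (pvCums rest 0) ((k' : Int) - 1) 0) := by
          rw [if_neg (by omega)]
          rcases k' with _ | m
          · norm_num [PySem.List.pyGetD_natCast]
          · rw [if_neg (by omega)]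
            have h1 : (((m + 1 + 1 : Nat) : Int) - 1) = ((m + 1 : Nat) : Int) := by push_cast; ring
            have h2 : (((m + 1 : Nat) : Int) - 1) = ((m : Nat) : Int) := by push_cast; ring
            rw [h1, h2, PySem.List.pyGetD_natCast, PySem.List.pyGetD_natCast]
            have hm : m < (pvCums rest 0).length := by rw [pvCums_length]; omega
            simp [List.getD_eq_getElem?_getD, List.getElem?_map, List.getElem?_eq_getElem hm]
        rw [hbase]
        have htext : PySem.List.pyGetD (t :: rest) (((k' + 1 : Nat)) : Int) "" =
            PySem.List.pyGetD rest ((k' : Nat) : Int) "" := by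
          rw [PySem.List.pyGetD_natCast, PySem.List.pyGetD_natCast, List.getD_cons_succ]
        rw [htext]
        have hrem : limit - (PySem.Str.len t + (if k' = 0 then 0 else PySem.List.pyGetD (pvCums rest 0) ((k' : Int) - 1) 0))
            = limit - PySem.Str.len t - (if k' = 0 then 0 else PySem.List.pyGetD (pvCums rest 0) ((k' : Int) - 1) 0) := by
          ring
        rw [hrem]
        split_ifs <;> simp
      · rw [if_neg (by omega), if_neg hcut]

theorem pvALoop_eq (blocks : List String) (parts : List String) (total limit : Int) :
    pvALoop blocks parts total limit = parts ++ pvPieces (pvBTexts blocks []) (limit - total) := by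
  induction blocks generalizing parts total with
  | nil => simp [pvALoop, pvBTexts, pvPieces]
  | cons b rest ih =>
    simp only [pvALoop, pvBTexts]
    split_ifs with h1 h2 h3 h4
    · exact ih parts total
    · -- overflow, remaining > 20: truncated piece, break
      rw [pvBTexts_acc]
      simp only [List.nil_append, List.singleton_append, pvPieces]
      rw [if_pos (by omega), if_pos h4]
    · -- overflow, remaining ≤ 20: bare break
      rw [pvBTexts_acc]
      simp only [List.nil_append, List.singleton_append, pvPieces]
      rw [if_pos (by omega), if_neg h4]
      simp
    · -- text kept
      rw [ih]
      conv_rhs => rw [pvBTexts_acc]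
      simp only [List.nil_append, List.singleton_append, pvPieces]
      rw [if_neg (by omega)]
      rw [sub_add_eq_sub_sub, List.append_assoc, List.singleton_append]
    · exact ih parts total

-- ===== VERDICT (by name: the statement is the Claim_ definition above) =====
theorem extract_user_lines_py_spec : Claim_equal_extract_user_lines_py := by
  intro content limit _
  unfold Spec_extract_user_lines_py extract_user_lines_py extract_user_lines_py_alt
  rw [pvALoop_eq, pvBAssemble_eq, List.nil_append, sub_zero]
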